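-- pv_equiv track=rewrite | github.com/mchang21/Advent_Of_Code | 2023/Day_13/13.py | summarize_notes
-- ===== SOURCE A (Python) =====
-- def transpose(matrix):
--     return [''.join(row) for row in zip(*matrix)]
--
-- def check_reflection(matrix):
--     for i in range(len(matrix)-1):
--         l, r = i, i+1
--         # check for matching rows
--         while l >= 0 and r < len(matrix) and matrix[l] == matrix[r]:
--             l -= 1
--             r += 1
--         # if we get to the end, we found a line of reflection between i and i+1
--         if l < 0 or r >= len(matrix):
--             return i+1
--     return 0
--
-- def summarize_notes(data, smudge=False):
--     total = 0
--     for matrix in data: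
--         if not smudge:
--             total += check_reflection(transpose(matrix)) + (check_reflection(matrix)*100)
--         else:
--             total += check_reflection_with_smudge(transpose(matrix)) + (check_reflection_with_smudge(matrix)*100)
--     return total
--
-- def check_reflection_with_smudge(matrix):
--     for i in range(len(matrix)-1):
--         smudge = False
--         l, r = i, i+1
--         while l >= 0 and r < len(matrix):
--             # count number of differences between rows
--             diff = sum(1 for a,b in zip(matrix[l], matrix[r]) if a!=b)
--             # condition to break
--             if diff >= 2 or (diff and smudge): break
--             # fix smudge
--             if diff == 1: smudge = True
--             l -= 1
--             r += 1
--         # found a line of reflection after fixing smudge and reaching out of bounds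
--         if smudge and (l < 0 or r >= len(matrix)):
--             return i+1
--     return 0
-- ===== SOURCE B (Python) =====
-- def transpose(matrix):
--     return [''.join(col) for col in zip(*matrix)]
--
-- def check_line(matrix, smudge):
--     for i in range(1, len(matrix)):
--         pairs = list(zip(reversed(matrix[:i]), matrix[i:]))
--         if smudge:
--             ok = sum(a != b for ta, tb in pairs for a, b in zip(ta, tb)) == 1
--         else:
--             ok = all(ta == tb for ta, tb in pairs)
--         if ok:
--             return i
--     return 0
--
-- def summarize_notes(data, smudge=False):
--     return sum(check_line(m, smudge) * 100 + check_line(transpose(m), smudge)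
--                for m in data)
-- ===== Notes on version B (the rewrite author's own statement) =====
-- stated objective: idiomatic
-- what changed: Replaced A's two per-candidate two-pointer while-loops (string-equality expansion and an early-break smudge state machine) with the slice-and-zip formulation: for each split, pair the reversed prefix with the suffix and test all-rows-equal (plain) or total character-mismatch == 1 (smudge).
import Mathlib
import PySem

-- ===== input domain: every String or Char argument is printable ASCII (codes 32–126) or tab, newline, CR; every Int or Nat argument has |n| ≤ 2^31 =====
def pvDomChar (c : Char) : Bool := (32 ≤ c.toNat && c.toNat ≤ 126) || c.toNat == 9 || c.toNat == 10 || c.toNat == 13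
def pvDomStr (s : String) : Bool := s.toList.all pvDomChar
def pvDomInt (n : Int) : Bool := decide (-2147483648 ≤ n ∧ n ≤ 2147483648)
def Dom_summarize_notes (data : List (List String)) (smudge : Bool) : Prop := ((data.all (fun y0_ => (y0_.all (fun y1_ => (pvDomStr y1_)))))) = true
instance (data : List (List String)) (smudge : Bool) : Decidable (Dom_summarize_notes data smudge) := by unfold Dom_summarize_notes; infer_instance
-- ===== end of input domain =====

-- B replaces A's two per-candidate two-pointer while-loops by the slice-and-zip
-- formulation (reversed prefix zipped with suffix, all-equal or mismatch-sum == 1): simpler, same cost.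

-- ===== PORT A =====
-- transpose(matrix) = [''.join(row) for row in zip(*matrix)]  (zip truncates to the shortest row; zip() of no rows is empty)
def pvJoinCols (m : List String) : List String :=
  match m with
  | [] => []
  | _ :: _ =>
    let n := ((m.map (fun s => s.toList.length)).min?).getD 0
    (List.range n).map (fun j => String.mk (m.map (fun s => s.toList[j]!)))

-- matrix[i] for an index the loop keeps in range (the "" default is never used under the guard)
def pvGd (m : List String) (i : Int) : String := (PySem.List.pyGet? m i).getD ""

-- sum(1 for a,b in zip(x,y) if a!=b)
def pvZipDiff (a b : String) : Int :=
  (((a.toList.zip b.toList).filter (fun p => p.1 != p.2)).length : Int)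

-- the inner while-loop of check_reflection
def pvWhileA (m : List String) (l r : Int) : Int × Int :=
  if 0 ≤ l ∧ r < (m.length : Int) ∧ pvGd m l = pvGd m r then
    pvWhileA m (l - 1) (r + 1)
  else (l, r)
termination_by ((m.length : Int) - r).toNat
decreasing_by omega

def pvCheckAGo (m : List String) : List Nat → Int
  | [] => 0
  | i :: rest =>
    let p := pvWhileA m (i : Int) ((i : Int) + 1)
    if p.1 < 0 ∨ (m.length : Int) ≤ p.2 then (i : Int) + 1
    else pvCheckAGo m rest

def pvCheckA (m : List String) : Int := pvCheckAGo m (List.range (m.length - 1))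

-- the inner while-loop of check_reflection_with_smudge (state: l, r, smudge flag)
def pvWhileS (m : List String) (l r : Int) (s : Bool) : Int × Int × Bool :=
  if 0 ≤ l ∧ r < (m.length : Int) then
    let d := pvZipDiff (pvGd m l) (pvGd m r)
    if 2 ≤ d ∨ (d ≠ 0 ∧ s = true) then (l, r, s)
    else pvWhileS m (l - 1) (r + 1) (if d = 1 then true else s)
  else (l, r, s)
termination_by ((m.length : Int) - r).toNat
decreasing_by omega

def pvCheckSGo (m : List String) : List Nat → Int
  | [] => 0
  | i :: rest =>
    let p := pvWhileS m (i : Int) ((i : Int) + 1) false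
    if p.2.2 = true ∧ (p.1 < 0 ∨ (m.length : Int) ≤ p.2.1) then (i : Int) + 1
    else pvCheckSGo m rest

def pvCheckS (m : List String) : Int := pvCheckSGo m (List.range (m.length - 1))

def summarize_notes (data : List (List String)) (smudge : Bool) : Int :=
  data.foldl (fun total matrix =>
    if !smudge then total + (pvCheckA (pvJoinCols matrix) + pvCheckA matrix * 100)
    else total + (pvCheckS (pvJoinCols matrix) + pvCheckS matrix * 100)) 0

-- ===== PORT B =====
-- B's transpose (same Python code as A's helper)
def pvJoinColsB (m : List String) : List String :=
  match m with
  | [] => []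
  | _ :: _ =>
    let k := ((m.map (fun s => s.toList.length)).min?).getD 0
    (List.range k).map (fun j => String.mk (m.map (fun s => s.toList[j]!)))

-- sum(a != b for a, b in zip(ta, tb))
def pvPairDiff (ta tb : String) : Int :=
  (((ta.toList.zip tb.toList).filter (fun p => p.1 != p.2)).length : Int)

-- the for-loop of check_line: pairs = zip(reversed(matrix[:i]), matrix[i:]), then the smudge/plain test
def pvCheckLineGo (m : List String) (smudge : Bool) : List Nat → Int
  | [] => 0
  | i :: rest =>
    let pairs := ((m.take i).reverse).zip (m.drop i)
    let ok := if smudge then ((pairs.map (fun p => pvPairDiff p.1 p.2)).sum == 1)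
              else pairs.all (fun p => p.1 == p.2)
    if ok then (i : Int) else pvCheckLineGo m smudge rest

def pvCheckLine (m : List String) (smudge : Bool) : Int :=
  pvCheckLineGo m smudge (List.range' 1 (m.length - 1))

def summarize_notes_alt (data : List (List String)) (smudge : Bool) : Int :=
  (data.map (fun m => pvCheckLine m smudge * 100 + pvCheckLine (pvJoinColsB m) smudge)).sum

-- ===== PRECONDITION & SPEC =====
def Spec_summarize_notes (data : List (List String)) (smudge : Bool) (out : Int) : Prop := out = summarize_notes_alt data smudge
instance (data : List (List String)) (smudge : Bool) (out : Int) : Decidable (Spec_summarize_notes data smudge out) := by unfold Spec_summarize_notes; infer_instance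

-- ===== CLAIM (what is proved, stated in full; the proofs are below) =====
def Claim_equal_summarize_notes : Prop := ∀ (data : List (List String)) (smudge : Bool), Dom_summarize_notes data smudge → Spec_summarize_notes data smudge (summarize_notes data smudge)

-- ===== LEMMAS AND PROOFS =====

-- the length-aware row difference A's plain string equality amounts to
def pvRowDiff (a b : String) (t : Int) : Int :=
  pvZipDiff a b + (if t = 0 ∧ a.toList.length ≠ b.toList.length then 1 else 0)

-- total target-t mismatch over the mirrored pairs (l-j, r+j) while in bounds
def pvRemSum (m : List String) (t : Int) (l r : Int) : Int :=
  if 0 ≤ l ∧ r < (m.length : Int) then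
    pvRowDiff (pvGd m l) (pvGd m r) t + pvRemSum m t (l - 1) (r + 1)
  else 0
termination_by ((m.length : Int) - r).toNat
decreasing_by omega

theorem pvZipDiff_nonneg (a b : String) : 0 ≤ pvZipDiff a b := by
  simp [pvZipDiff]

theorem pvRowDiff_nonneg (a b : String) (t : Int) : 0 ≤ pvRowDiff a b t := by
  have := pvZipDiff_nonneg a b
  unfold pvRowDiff; split_ifs <;> omega

theorem pvRemSum_nonneg (m : List String) (t l r : Int) : 0 ≤ pvRemSum m t l r := by
  fun_induction pvRemSum with
  | case1 l r h ih => have := pvRowDiff_nonneg (pvGd m l) (pvGd m r) t; omega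
  | case2 l r h => omega

theorem listZipDiff_eq_nil_iff (xs ys : List Char) :
    (((xs.zip ys).filter (fun p => p.1 != p.2)).length = 0 ∧ xs.length = ys.length) ↔ xs = ys := by
  induction xs generalizing ys with
  | nil => cases ys <;> simp
  | cons x xs ih =>
    cases ys with
    | nil => simp
    | cons y ys =>
      by_cases hxy : x = y
      · subst hxy
        simp only [List.zip_cons_cons, List.filter_cons, bne_self_eq_false, List.length_cons,
          Nat.add_right_cancel_iff, List.cons.injEq, true_and]
        simpa using ih ys
      · simp only [List.zip_cons_cons, List.filter_cons, List.cons.injEq]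
        have : (x != y) = true := by simpa using hxy
        simp [this, hxy]

theorem pvRowDiff_zero_iff (a b : String) : pvRowDiff a b 0 = 0 ↔ a = b := by
  have hz := pvZipDiff_nonneg a b
  have hlist := listZipDiff_eq_nil_iff a.toList b.toList
  have hstr : a = b ↔ a.toList = b.toList := String.toList_inj.symm
  rw [hstr, ← hlist]
  unfold pvRowDiff pvZipDiff
  constructor
  · intro h
    split_ifs at h with hc
    · exfalso; simp [pvZipDiff] at hz; omega
    · push_neg at hc
      constructor
      · omega
      · exact hc (by omega)
  · rintro ⟨h1, h2⟩
    simp [h1, h2]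

theorem pvRowDiff_one (a b : String) : pvRowDiff a b 1 = pvZipDiff a b := by
  simp [pvRowDiff]

-- A's plain while-loop accepts iff the total (length-aware) mismatch is 0
theorem pvWhileA_spec (m : List String) (l r : Int) :
    ((pvWhileA m l r).1 < 0 ∨ (m.length : Int) ≤ (pvWhileA m l r).2) ↔ pvRemSum m 0 l r = 0 := by
  fun_induction pvWhileA with
  | case1 l r h ih =>
    obtain ⟨h1, h2, h3⟩ := h
    rw [pvRemSum]
    have hd : pvRowDiff (pvGd m l) (pvGd m r) 0 = 0 := (pvRowDiff_zero_iff _ _).mpr h3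
    simp only [if_pos (⟨h1, h2⟩ : 0 ≤ l ∧ r < (m.length : Int)), hd, zero_add]
    exact ih
  | case2 l r h =>
    rw [pvRemSum]
    by_cases hb : 0 ≤ l ∧ r < (m.length : Int)
    · have hne : pvGd m l ≠ pvGd m r := fun hc => h ⟨hb.1, hb.2, hc⟩
      have hd : pvRowDiff (pvGd m l) (pvGd m r) 0 ≠ 0 := fun hc => hne ((pvRowDiff_zero_iff _ _).mp hc)
      have hd0 := pvRowDiff_nonneg (pvGd m l) (pvGd m r) 0
      have hrest := pvRemSum_nonneg m 0 (l - 1) (r + 1)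
      simp only [if_pos hb]
      constructor
      · intro hc; exfalso; omega
      · intro hc; exfalso; omega
    · simp only [if_neg hb]
      have : l < 0 ∨ (m.length : Int) ≤ r := by omega
      simp [this]

-- A's smudge while-loop accepts iff total zip mismatch plus the incoming flag equals 1
theorem pvWhileS_spec (m : List String) (l r : Int) (s : Bool) :
    ((pvWhileS m l r s).2.2 = true ∧
      ((pvWhileS m l r s).1 < 0 ∨ (m.length : Int) ≤ (pvWhileS m l r s).2.1)) ↔
    pvRemSum m 1 l r + (if s then 1 else 0) = 1 := by
  fun_induction pvWhileS with
  | case1 l r s hb d hbrk =>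
    have hdd : d = pvZipDiff (pvGd m l) (pvGd m r) := rfl
    clear_value d
    rw [pvRemSum, if_pos hb, pvRowDiff_one, ← hdd]
    have hrest := pvRemSum_nonneg m 1 (l - 1) (r + 1)
    have hd0 : 0 ≤ d := hdd ▸ pvZipDiff_nonneg (pvGd m l) (pvGd m r)
    simp only
    constructor
    · rintro ⟨_, h2⟩; exfalso; omega
    · intro hc; exfalso
      rcases hbrk with h2le | ⟨hne, hs⟩
      · cases s <;> simp only [if_pos rfl, Bool.false_eq_true, if_false, add_zero] at hc <;> omega
      · rw [hs] at hc; simp at hc; omega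
  | case2 l r s hb d hbrk ih =>
    have hdd : d = pvZipDiff (pvGd m l) (pvGd m r) := rfl
    clear_value d
    rw [pvRemSum, if_pos hb, pvRowDiff_one, ← hdd]
    simp only [dite_eq_ite] at ih
    rw [ih]
    have hd0 : 0 ≤ d := hdd ▸ pvZipDiff_nonneg (pvGd m l) (pvGd m r)
    have hd2 : d < 2 := by
      by_contra h; exact hbrk (Or.inl (by omega))
    have hds : d ≠ 0 → s = false := by
      intro h; by_contra hs
      exact hbrk (Or.inr ⟨h, by cases s <;> simp_all⟩)
    by_cases hd1 : d = 1
    · have hs := hds (by omega)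
      subst hd1; subst hs
      simp
    · have hz : d = 0 := by omega
      subst hz
      simp at hd1
      simp
  | case3 l r s hb =>
    rw [pvRemSum, if_neg hb]
    cases s <;> simp <;> omega

-- pvRemSum as the explicit sum over j < min(l+1, n-r)
theorem map_range_succ_sum (f : Nat → Int) (n : Nat) :
    ((List.range (n + 1)).map f).sum = f 0 + ((List.range n).map (fun j => f (j + 1))).sum := by
  rw [List.range_succ_eq_map]
  simp [List.map_map, Function.comp_def]

theorem pvRemSum_eq_sum (m : List String) (t : Int) (l r : Int) :
    pvRemSum m t l r =
      ((List.range (min ((l + 1).toNat) (((m.length : Int) - r).toNat))).map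
        (fun (j : Nat) => pvRowDiff (pvGd m (l - (j : Int))) (pvGd m (r + (j : Int))) t)).sum := by
  fun_induction pvRemSum with
  | case1 l r h ih =>
    have hk : min ((l + 1).toNat) (((m.length : Int) - r).toNat)
        = min (((l - 1) + 1).toNat) (((m.length : Int) - (r + 1)).toNat) + 1 := by omega
    rw [hk, map_range_succ_sum]
    rw [ih]
    congr 1
    · simp
    · apply congrArg
      apply List.map_congr_left
      intro j _
      have h1 : l - ((j : Int) + 1) = (l - 1) - (j : Int) := by ring
      have h2 : r + ((j : Int) + 1) = (r + 1) + (j : Int) := by ring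
      simp only [Nat.cast_add, Nat.cast_one, h1, h2]
  | case2 l r h =>
    have hk : min ((l + 1).toNat) (((m.length : Int) - r).toNat) = 0 := by omega
    simp [hk]

-- B's mirrored pair list, written as the indexed window A's loops walk
theorem pairs_eq_window (m : List String) (i : Nat) :
    ((m.take (i + 1)).reverse).zip (m.drop (i + 1)) =
      (List.range (min (((i : Int) + 1).toNat) (((m.length : Int) - ((i : Int) + 1)).toNat))).map
        (fun (j : Nat) => (pvGd m ((i : Int) - (j : Int)), pvGd m (((i : Int) + 1) + (j : Int)))) := by
  apply List.ext_getElem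
  · simp [List.length_zip]; omega
  · intro j hj hj'
    have hk : j < min (i + 1) (m.length - (i + 1)) := by
      simp [List.length_zip] at hj; omega
    have hij : i + 1 ≤ m.length := by omega
    have hjlt : j < i + 1 := by omega
    have hjr : i + 1 + j < m.length := by omega
    have hgetl : pvGd m ((i : Int) - (j : Int)) = m[i - j]'(by omega) := by
      have hcast : ((i : Int) - (j : Int)) = ((i - j : Nat) : Int) := by omega
      rw [pvGd, hcast, PySem.List.pyGet?_natCast,
        List.getElem?_eq_getElem (by omega : i - j < m.length), Option.getD_some]
    have hgetr : pvGd m (((i : Int) + 1) + (j : Int)) = m[i + 1 + j]'hjr := by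
      have hcast : (((i : Int) + 1) + (j : Int)) = ((i + 1 + j : Nat) : Int) := by push_cast; ring
      rw [pvGd, hcast, PySem.List.pyGet?_natCast,
        List.getElem?_eq_getElem hjr, Option.getD_some]
    simp only [List.getElem_map, List.getElem_range, List.getElem_zip, List.getElem_reverse,
      List.getElem_take, List.getElem_drop, hgetl, hgetr]
    have hlen : (m.take (i + 1)).length = i + 1 := by simp; omega
    simp only [hlen, Nat.add_sub_cancel]

-- sum of nonneg ints over a range is zero iff each term is
theorem range_sum_zero_iff (f : Nat → Int) (hf : ∀ j, 0 ≤ f j) (k : Nat) :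
    ((List.range k).map f).sum = 0 ↔ ∀ j < k, f j = 0 := by
  induction k with
  | zero => simp
  | succ k ih =>
    rw [List.range_succ, List.map_append, List.sum_append]
    have hs : 0 ≤ ((List.range k).map f).sum := by
      apply List.sum_nonneg; intro x hx
      obtain ⟨j, _, rfl⟩ := List.mem_map.mp hx; exact hf j
    have hk := hf k
    simp only [List.map_cons, List.map_nil, List.sum_cons, List.sum_nil, add_zero]
    constructor
    · intro h
      have h1 : ((List.range k).map f).sum = 0 := by omega
      have h2 : f k = 0 := by omega
      intro j hj
      rcases Nat.lt_succ_iff_lt_or_eq.mp hj with hlt | rfl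
      · exact (ih.mp h1) j hlt
      · exact h2
    · intro h
      have h1 : ((List.range k).map f).sum = 0 := ih.mpr (fun j hj => h j (by omega))
      have h2 : f k = 0 := h k (by omega)
      omega

-- B's plain test at split i+1 ↔ the mirrored mismatch total is 0
theorem plain_cond_iff (m : List String) (i : Nat) :
    ((((m.take (i + 1)).reverse).zip (m.drop (i + 1))).all (fun p => p.1 == p.2) = true) ↔
    pvRemSum m 0 (i : Int) ((i : Int) + 1) = 0 := by
  rw [pairs_eq_window, pvRemSum_eq_sum,
    range_sum_zero_iff _ (fun j => pvRowDiff_nonneg _ _ _)]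
  simp only [List.all_eq_true, List.mem_map, List.mem_range, forall_exists_index, and_imp]
  constructor
  · intro h j hj
    exact (pvRowDiff_zero_iff _ _).mpr (by simpa using h _ j hj rfl)
  · intro h p j hj hp
    subst hp
    simpa using (pvRowDiff_zero_iff _ _).mp (h j hj)

-- B's smudge sum at split i+1 = the mirrored mismatch total with target 1
theorem smudge_sum_eq (m : List String) (i : Nat) :
    (((((m.take (i + 1)).reverse).zip (m.drop (i + 1))).map
        (fun p => pvPairDiff p.1 p.2)).sum) =
    pvRemSum m 1 (i : Int) ((i : Int) + 1) := by
  rw [pairs_eq_window, pvRemSum_eq_sum, List.map_map]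
  apply congrArg
  apply List.map_congr_left
  intro j _
  simp [Function.comp, pvPairDiff, pvZipDiff, pvRowDiff]

-- per-candidate equivalence, plain case
theorem pvCheckAGo_eq (m : List String) (is : List Nat) :
    pvCheckAGo m is = pvCheckLineGo m false (is.map (· + 1)) := by
  induction is with
  | nil => rfl
  | cons i rest ih =>
    rw [List.map_cons, pvCheckAGo, pvCheckLineGo]
    simp only [Bool.false_eq_true, if_false]
    have hA := pvWhileA_spec m (i : Int) ((i : Int) + 1)
    have hB := plain_cond_iff m i
    by_cases hc : pvRemSum m 0 (i : Int) ((i : Int) + 1) = 0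
    · rw [if_pos (hA.mpr hc), if_pos (hB.mpr hc)]
      push_cast; ring
    · rw [if_neg (fun h => hc (hA.mp h)), if_neg (fun h => hc (hB.mp h)), ih]

-- per-candidate equivalence, smudge case
theorem pvCheckSGo_eq (m : List String) (is : List Nat) :
    pvCheckSGo m is = pvCheckLineGo m true (is.map (· + 1)) := by
  induction is with
  | nil => rfl
  | cons i rest ih =>
    rw [List.map_cons, pvCheckSGo, pvCheckLineGo]
    simp only [if_true]
    have hS := pvWhileS_spec m (i : Int) ((i : Int) + 1) false
    simp only [Bool.false_eq_true, if_false, add_zero] at hS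
    have hB := smudge_sum_eq m i
    by_cases hc : pvRemSum m 1 (i : Int) ((i : Int) + 1) = 1
    · rw [if_pos (hS.mpr hc), if_pos (by rw [hB]; exact_mod_cast beq_iff_eq.mpr hc)]
      push_cast; ring
    · rw [if_neg (fun h => hc (hS.mp h)),
        if_neg (by rw [hB]; exact fun h => hc (beq_iff_eq.mp h)), ih]

theorem range'_one (n : Nat) : List.range' 1 n = (List.range n).map (· + 1) := by
  rw [List.range'_eq_map_range]
  apply List.map_congr_left
  intro j _; omega

theorem pvCheckA_eq (m : List String) : pvCheckA m = pvCheckLine m false := by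
  rw [pvCheckA, pvCheckLine, range'_one]; exact pvCheckAGo_eq m _

theorem pvCheckS_eq (m : List String) : pvCheckS m = pvCheckLine m true := by
  rw [pvCheckS, pvCheckLine, range'_one]; exact pvCheckSGo_eq m _

theorem joinCols_eq (m : List String) : pvJoinCols m = pvJoinColsB m := by
  cases m <;> rfl

theorem summarize_fold_eq (smudge : Bool) (data : List (List String)) (acc : Int) :
    data.foldl (fun total matrix =>
      if !smudge then total + (pvCheckA (pvJoinCols matrix) + pvCheckA matrix * 100)
      else total + (pvCheckS (pvJoinCols matrix) + pvCheckS matrix * 100)) acc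
    = acc + (data.map (fun m =>
        pvCheckLine m smudge * 100 + pvCheckLine (pvJoinColsB m) smudge)).sum := by
  induction data generalizing acc with
  | nil => simp
  | cons m rest ih =>
    rw [List.foldl_cons, List.map_cons, List.sum_cons, ih]
    cases smudge
    · simp only [Bool.not_false, if_true, pvCheckA_eq, joinCols_eq]
      ring
    · simp only [Bool.not_true, Bool.false_eq_true, if_false, pvCheckS_eq, joinCols_eq]
      ring

-- ===== VERDICT (by name: the statement is the Claim_ definition above) =====
theorem summarize_notes_spec : Claim_equal_summarize_notes := by
  intro data smudge _
  unfold Spec_summarize_notes summarize_notes summarize_notes_alt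
  rw [summarize_fold_eq]
  simp
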